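-- pv_equiv track=rewrite | github.com/AssortedFantasy/dnn-arithmetic | src/dnn_arithmetic/training.py | _find_valid_batch_size
-- ===== SOURCE A (Python) =====
-- def _find_valid_batch_size(requested: int, data_len: int) -> int:
--     """Find a non-ragged batch size that fits the available data."""
--     if data_len == 0:
--         raise ValueError("Cannot create batches from empty data.")
--     if data_len >= requested:
--         return requested
--     if data_len >= 64:
--         return (data_len // 64) * 64
--     for size in (32, 16, 8, 4, 2, 1):
--         if data_len >= size:
--             return size
--     return 1
-- ===== SOURCE B (Python) =====
-- def _find_valid_batch_size(requested: int, data_len: int) -> int: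
--     """Find a non-ragged batch size that fits the available data."""
--     if data_len == 0:
--         raise ValueError("Cannot create batches from empty data.")
--     if data_len >= requested:
--         return requested
--     if data_len >= 64:
--         return data_len - data_len % 64
--     return 1 << (data_len.bit_length() - 1)
-- ===== Notes on version B (the rewrite author's own statement) =====
-- stated objective: simpler
-- what changed: The 6-step descending scan over (32,16,8,4,2,1) is replaced by the closed form 1 << (data_len.bit_length()-1) (largest power of two <= data_len), and the >=64 branch rounds down with data_len - data_len % 64 instead of (data_len // 64) * 64.
-- outside the precondition, e.g. on _find_valid_batch_size(10, -5): A returns 1, B returns 4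
import Mathlib
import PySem

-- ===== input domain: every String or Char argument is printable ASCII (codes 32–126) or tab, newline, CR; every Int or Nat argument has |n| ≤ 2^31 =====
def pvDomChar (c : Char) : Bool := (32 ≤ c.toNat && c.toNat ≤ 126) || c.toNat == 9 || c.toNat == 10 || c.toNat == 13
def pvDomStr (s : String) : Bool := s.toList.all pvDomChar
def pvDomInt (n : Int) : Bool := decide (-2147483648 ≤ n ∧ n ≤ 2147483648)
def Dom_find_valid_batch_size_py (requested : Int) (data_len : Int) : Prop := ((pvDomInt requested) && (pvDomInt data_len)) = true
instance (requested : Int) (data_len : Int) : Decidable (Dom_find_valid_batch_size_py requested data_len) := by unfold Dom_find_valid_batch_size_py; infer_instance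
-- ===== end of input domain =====

-- B replaces the descending (32,16,8,4,2,1) scan with the closed form 1 << (bit_length-1)
-- and rounds the >=64 case with `data_len - data_len % 64`; objective: simpler.

-- ===== PORT A =====
-- the `data_len == 0` raise is excluded by Pre_; the for-loop over the literal
-- tuple (32,16,8,4,2,1) with early return is unrolled to the equivalent if-chain
def find_valid_batch_size_py (requested : Int) (data_len : Int) : Int :=
  if data_len ≥ requested then requested
  else if data_len ≥ 64 then (PySem.Int.floordiv data_len 64) * 64
  else if data_len ≥ 32 then 32
  else if data_len ≥ 16 then 16
  else if data_len ≥ 8 then 8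
  else if data_len ≥ 4 then 4
  else if data_len ≥ 2 then 2
  else if data_len ≥ 1 then 1
  else 1

-- ===== PORT B =====
-- `1 << k` ported as 2 ^ k; Python's k = bit_length - 1 is ≥ 0 whenever data_len ≠ 0,
-- so the Nat subtraction `PySem.Int.bitLength data_len - 1` is exact there
def find_valid_batch_size_py_alt (requested : Int) (data_len : Int) : Int :=
  if data_len ≥ requested then requested
  else if data_len ≥ 64 then data_len - PySem.Int.mod data_len 64
  else (2 : Int) ^ (PySem.Int.bitLength data_len - 1)

-- ===== PRECONDITION & SPEC =====
-- Pre_ keeps data_len to the natural domain of a data length, 1 ≤ data_len: at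
-- data_len = 0 A raises ValueError, and for negative data_len A's fall-through
-- values (requested, or 1) are artefacts of the loop, not a specified behaviour.
def Pre_find_valid_batch_size_py (requested : Int) (data_len : Int) : Prop := 1 ≤ data_len
instance (requested : Int) (data_len : Int) : Decidable (Pre_find_valid_batch_size_py requested data_len) := by unfold Pre_find_valid_batch_size_py; infer_instance
def pvWitness_find_valid_batch_size_py : Int × Int := (100, 7)
def Spec_find_valid_batch_size_py (requested : Int) (data_len : Int) (out : Int) : Prop := out = find_valid_batch_size_py_alt requested data_len
instance (requested : Int) (data_len : Int) (out : Int) : Decidable (Spec_find_valid_batch_size_py requested data_len out) := by unfold Spec_find_valid_batch_size_py; infer_instance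

-- ===== CLAIM (what is proved, stated in full; the proofs are below) =====
def Claim_equal_find_valid_batch_size_py : Prop := ∀ (requested : Int) (data_len : Int), Dom_find_valid_batch_size_py requested data_len → Pre_find_valid_batch_size_py requested data_len → Spec_find_valid_batch_size_py requested data_len (find_valid_batch_size_py requested data_len)

-- ===== LEMMAS AND PROOFS =====

-- the ≥64 branch: (d // 64) * 64 = d - d % 64
theorem round64_eq (d : Int) :
    (PySem.Int.floordiv d 64) * 64 = d - PySem.Int.mod d 64 := by
  have h := PySem.Int.floordiv_mul_add_mod d 64
  omega

-- the small branch: for 1 ≤ d < 64 the scan equals 2 ^ (bitLength d - 1)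
theorem small_eq (d : Int) (h1 : 1 ≤ d) (h64 : ¬ d ≥ 64) :
    (if d ≥ 32 then (32 : Int)
     else if d ≥ 16 then 16
     else if d ≥ 8 then 8
     else if d ≥ 4 then 4
     else if d ≥ 2 then 2
     else if d ≥ 1 then 1
     else 1) = (2 : Int) ^ (PySem.Int.bitLength d - 1) := by
  have h2 : d < 64 := by omega
  interval_cases d <;> decide

-- ===== VERDICT (by name: the statement is the Claim_ definition above) =====
theorem find_valid_batch_size_py_spec : Claim_equal_find_valid_batch_size_py := by
  intro requested data_len _ hpre
  unfold Spec_find_valid_batch_size_py find_valid_batch_size_py find_valid_batch_size_py_alt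
  by_cases hr : data_len ≥ requested
  · rw [if_pos hr, if_pos hr]
  · rw [if_neg hr, if_neg hr]
    by_cases h64 : data_len ≥ 64
    · rw [if_pos h64, if_pos h64]
      exact round64_eq data_len
    · rw [if_neg h64, if_neg h64]
      exact small_eq data_len hpre h64
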